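-- pv_equiv track=rewrite | github.com/Mushtaq-BGA/Enterprise-Inference | phase5-optimization/benchmark_model_old.py | generate_default_prompts
-- ===== SOURCE A (Python) =====
-- from typing import List, Dict, Any
--
-- def generate_default_prompts(num_prompts: int) -> List[str]:
--     """Generate default test prompts as fallback"""
--
--     base_prompts = [
--         "Explain the concept of machine learning in simple terms.",
--         "Write a short story about a robot learning to paint.",
--         "What are the benefits of renewable energy?",
--         "Describe the water cycle in detail.",
--         "How does photosynthesis work in plants?",
--         "Explain quantum computing to a beginner.",
--         "What are the main causes of climate change?",
--         "Describe the process of protein synthesis.",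
--         "What is the significance of the Renaissance period?",
--         "Explain how neural networks learn from data."
--     ]
--     prompts = []
--     for i in range(num_prompts):
--         prompts.append(base_prompts[i % len(base_prompts)])
--     return prompts
-- ===== SOURCE B (Python) =====
-- def generate_default_prompts(num_prompts):
--     """Generate default test prompts as fallback"""
--     base_prompts = [
--         "Explain the concept of machine learning in simple terms.",
--         "Write a short story about a robot learning to paint.",
--         "What are the benefits of renewable energy?",
--         "Describe the water cycle in detail.",
--         "How does photosynthesis work in plants?",
--         "Explain quantum computing to a beginner.",
--         "What are the main causes of climate change?",
--         "Describe the process of protein synthesis.",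
--         "What is the significance of the Renaissance period?",
--         "Explain how neural networks learn from data."
--     ]
--     copies = num_prompts // len(base_prompts) + 1
--     return (base_prompts * copies)[:num_prompts]
-- ===== Notes on version B (the rewrite author's own statement) =====
-- stated objective: idiomatic
-- what changed: Replaces the per-index append loop with modular indexing by one bulk expression that replicates the base list enough times and slices the result to the requested length.
import Mathlib
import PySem

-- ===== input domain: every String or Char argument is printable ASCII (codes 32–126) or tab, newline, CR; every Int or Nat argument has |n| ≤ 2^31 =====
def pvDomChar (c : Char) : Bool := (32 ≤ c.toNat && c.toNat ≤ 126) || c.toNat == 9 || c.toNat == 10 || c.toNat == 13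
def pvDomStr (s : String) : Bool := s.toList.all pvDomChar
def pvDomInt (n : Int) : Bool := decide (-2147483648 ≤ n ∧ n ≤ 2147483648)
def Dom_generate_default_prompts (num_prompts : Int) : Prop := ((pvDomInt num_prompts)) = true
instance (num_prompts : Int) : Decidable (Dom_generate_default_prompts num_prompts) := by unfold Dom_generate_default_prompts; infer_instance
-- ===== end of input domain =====

-- B replaces A's per-index loop with modular indexing by one bulk replicate-and-slice expression (objective: idiomatic).

-- ===== PORT A =====
-- the module-level constant list base_prompts (shared verbatim by both versions)
def pvBasePrompts : List String := [
  "Explain the concept of machine learning in simple terms.",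
  "Write a short story about a robot learning to paint.",
  "What are the benefits of renewable energy?",
  "Describe the water cycle in detail.",
  "How does photosynthesis work in plants?",
  "Explain quantum computing to a beginner.",
  "What are the main causes of climate change?",
  "Describe the process of protein synthesis.",
  "What is the significance of the Renaissance period?",
  "Explain how neural networks learn from data."]

-- for i in range(num_prompts): prompts.append(base_prompts[i % len(base_prompts)])
-- pyGetD is exact here: i ≥ 0 and i % 10 ∈ [0,10) is always in range, so Python never raises
def generate_default_prompts (num_prompts : Int) : List String :=
  (PySem.List.pyRange 0 num_prompts 1).foldl
    (fun prompts i =>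
      prompts ++ [PySem.List.pyGetD pvBasePrompts (PySem.Int.mod i (pvBasePrompts.length : Int)) ""])
    []

-- ===== PORT B =====
-- copies = num_prompts // len(base_prompts) + 1 ; return (base_prompts * copies)[:num_prompts]
def generate_default_prompts_alt (num_prompts : Int) : List String :=
  let copies := PySem.Int.floordiv num_prompts (pvBasePrompts.length : Int) + 1
  -- Python 'list * k' is [] for k ≤ 0, else k concatenated copies
  let pool := if copies ≤ 0 then [] else (List.replicate copies.toNat pvBasePrompts).flatten
  PySem.List.slice pool none (some num_prompts)

-- ===== PRECONDITION & SPEC =====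
def Spec_generate_default_prompts (num_prompts : Int) (out : List String) : Prop := out = generate_default_prompts_alt num_prompts
instance (num_prompts : Int) (out : List String) : Decidable (Spec_generate_default_prompts num_prompts out) := by unfold Spec_generate_default_prompts; infer_instance

-- ===== CLAIM (what is proved, stated in full; the proofs are below) =====
def Claim_equal_generate_default_prompts : Prop := ∀ (num_prompts : Int), Dom_generate_default_prompts num_prompts → Spec_generate_default_prompts num_prompts (generate_default_prompts num_prompts)

-- ===== LEMMAS AND PROOFS =====

-- the first m positions of a list read by getD are the take-prefix
lemma map_getD_range_eq_take (base : List String) (m : Nat) (hm : m ≤ base.length) :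
    (List.range m).map (fun i => base.getD i "") = base.take m := by
  apply List.ext_getElem
  · simp [Nat.min_eq_left hm]
  · intro i h1 h2
    simp only [List.getElem_map, List.getElem_range, List.getElem_take]
    rw [List.getD_eq_getElem]

-- reading a k-fold replication through take is modular indexing
lemma take_flatten_replicate (base : List String) (hb : base ≠ []) :
    ∀ (k m : Nat), m ≤ k * base.length →
      (List.flatten (List.replicate k base)).take m
        = (List.range m).map (fun i => base.getD (i % base.length) "") := by
  intro k
  induction k with
  | zero =>
    intro m hm
    simp only [Nat.zero_mul, Nat.le_zero] at hm
    subst hm; simp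
  | succ k ih =>
    intro m hm
    have hL : 0 < base.length := List.length_pos_iff.mpr hb
    rw [List.replicate_succ, List.flatten_cons, List.take_append]
    by_cases hcase : m ≤ base.length
    · have : m - base.length = 0 := by omega
      rw [this]
      simp only [List.take_zero, List.append_nil]
      rw [← map_getD_range_eq_take base m hcase]
      apply List.map_congr_left
      intro i hi
      rw [List.mem_range] at hi
      rw [Nat.mod_eq_of_lt (by omega)]
    · rw [Nat.not_le] at hcase
      have hsplit : m = base.length + (m - base.length) := by omega
      rw [List.take_of_length_le (by omega)]
      rw [ih (m - base.length) (by
        have h : (k + 1) * base.length = k * base.length + base.length := by ring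
        omega)]
      conv_rhs => rw [hsplit, List.range_add, List.map_append, List.map_map]
      congr 1
      · symm
        rw [List.map_congr_left (l := List.range base.length)
              (f := fun i => base.getD (i % base.length) "") (g := fun i => base.getD i "")
              (fun i hi => by simp only [List.mem_range] at hi; simp [Nat.mod_eq_of_lt hi])]
        rw [map_getD_range_eq_take base base.length le_rfl]
        simp
      · apply List.map_congr_left
        intro i _
        simp [Nat.add_mod_left]

-- ===== VERDICT (by name: the statement is the Claim_ definition above) =====
theorem generate_default_prompts_spec : Claim_equal_generate_default_prompts := by
  intro n _
  unfold Spec_generate_default_prompts generate_default_prompts generate_default_prompts_alt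
  rcases lt_trichotomy n 0 with hn | hn | hn
  · -- negative: both empty
    have hc : PySem.Int.floordiv n (pvBasePrompts.length : Int) + 1 ≤ 0 := by
      have : PySem.Int.floordiv n (pvBasePrompts.length : Int) < 0 := by
        rw [PySem.Int.floordiv_lt_iff_lt_mul (by simp [pvBasePrompts])]
        simpa using hn
      omega
    rw [PySem.List.pyRange_one_eq_nil (by omega)]
    simp only [List.foldl_nil, if_pos hc]
    simp [PySem.List.slice]
  · subst hn
    rw [PySem.List.pyRange_one_eq_nil (by omega)]
    norm_num [PySem.Int.floordiv, PySem.List.slice]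
  · -- positive: n = ↑m with 0 < m
    obtain ⟨m, rfl⟩ : ∃ m : Nat, n = (m : Int) := ⟨n.toNat, (Int.toNat_of_nonneg hn.le).symm⟩
    have hm : 0 < m := by exact_mod_cast hn
    rw [PySem.List.pyRange_zero_natCast, PySem.List.foldl_append_singleton_eq_map, List.map_map]
    have hc : ¬ (PySem.Int.floordiv (m : Int) (pvBasePrompts.length : Int) + 1 ≤ 0) := by
      have : (0:Int) ≤ PySem.Int.floordiv (m : Int) (pvBasePrompts.length : Int) := by
        rw [PySem.Int.le_floordiv_iff_mul_le (by simp [pvBasePrompts])]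
        exact_mod_cast Int.natCast_nonneg m
      omega
    simp only [if_neg hc]
    have hLen : (pvBasePrompts.length : Int) = (10:Int) := by norm_num [pvBasePrompts]
    have hfd : PySem.Int.floordiv (m : Int) (pvBasePrompts.length : Int) + 1 = ((m / 10 + 1 : Nat) : Int) := by
      rw [hLen, show ((10:Int)) = ((10:Nat):Int) from by norm_num,
        PySem.Int.floordiv_natCast m 10]
      push_cast
      ring
    rw [hfd, PySem.List.slice_to_natCast]
    rw [Int.toNat_natCast]
    rw [take_flatten_replicate pvBasePrompts (by simp [pvBasePrompts]) (m / 10 + 1) m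
      (by simp only [pvBasePrompts, List.length]; omega)]
    apply List.map_congr_left
    intro i hi
    have h10 : (pvBasePrompts.length : Int) = ((10:Nat):Int) := by norm_num [pvBasePrompts]
    simp only [Function.comp_apply]
    rw [h10, PySem.Int.mod_natCast i 10, PySem.List.pyGetD_natCast]
    norm_num [pvBasePrompts]
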